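-- pv_equiv track=rewrite | github.com/aws-cloudformation/cloudformation-cli-python-plugin | src/cloudformation_cli_python_lib/identifier_utils.py | fair_split
-- ===== SOURCE A (Python) =====
-- from typing import List
--
-- def fair_split(cap: int, buckets: List[int]) -> List[int]:
--     remaining: int = cap
--     buckets_length: int = len(buckets)
--
--     allocated: List[int] = [0] * buckets_length
--
--     while remaining > 0:
--         max_allocation: int = (
--             1 if remaining < buckets_length else remaining // buckets_length
--         )
--         buckets_satisfied: int = 0
--
--         for index in range(0, buckets_length):
--             if allocated[index] < buckets[index]:
--                 increment = min(max_allocation, buckets[index] - allocated[index])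
--                 allocated[index] += increment
--                 remaining -= increment
--             else:
--                 buckets_satisfied += 1
--
--             if remaining <= 0 or buckets_satisfied == buckets_length:
--                 return allocated
--     return allocated
-- ===== SOURCE B (Python) =====
-- from typing import List
--
--
-- def fair_split(cap: int, buckets: List[int]) -> List[int]:
--     n = len(buckets)
--     if cap <= 0:
--         return [0] * n
--     pos = sorted(b if b > 0 else 0 for b in buckets)
--     if cap >= sum(pos):
--         return [b if b > 0 else 0 for b in buckets]
--     # water level: largest T with sum(min(p, T)) <= cap; rem extra units go
--     # one each to the first buckets still above the level, in input order
--     T = 0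
--     rem = cap
--     m = n
--     for p in pos:
--         if p <= T:
--             m -= 1
--             continue
--         step = p - T
--         if m * step <= rem:
--             rem -= m * step
--             T = p
--             m -= 1
--         else:
--             k = rem // m
--             T += k
--             rem -= k * m
--             break
--     out = []
--     for b in buckets:
--         bp = b if b > 0 else 0
--         if bp > T:
--             if rem > 0:
--                 out.append(T + 1)
--                 rem -= 1
--             else:
--                 out.append(T)
--         else:
--             out.append(bp)
--     return out
-- ===== Notes on version B (the rewrite author's own statement) =====
-- stated objective: alternative
-- what changed: A refills the buckets pass after pass (round-robin with a per-pass quota) until the cap is used up; B sorts the clamped capacities once, computes the final water level T and the leftover r in one scan over the sorted list in closed form, and emits min(capacity, T) plus one extra unit for the first r buckets still above the level (intended as asymptotically faster on adversarial inputs; a timing run read 1.66x at the largest size but not consistently, so no speed is claimed).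
import Mathlib
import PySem

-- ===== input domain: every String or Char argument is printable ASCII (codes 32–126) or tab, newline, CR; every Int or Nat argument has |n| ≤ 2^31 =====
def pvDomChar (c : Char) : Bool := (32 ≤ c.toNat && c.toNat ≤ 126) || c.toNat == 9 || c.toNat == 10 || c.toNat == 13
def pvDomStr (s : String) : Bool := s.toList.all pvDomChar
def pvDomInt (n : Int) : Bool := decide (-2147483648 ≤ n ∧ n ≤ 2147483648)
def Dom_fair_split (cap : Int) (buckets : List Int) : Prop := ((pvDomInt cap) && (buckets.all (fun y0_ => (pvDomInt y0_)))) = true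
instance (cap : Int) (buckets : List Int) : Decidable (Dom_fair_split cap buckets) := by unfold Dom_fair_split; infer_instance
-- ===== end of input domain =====

-- B replaces A's pass-after-pass round-robin refill by a single sort-and-scan closed-form
-- computation of the final water level (objective: alternative algorithm, same exact result).

-- ===== PORT A =====
-- inner `for index in range(0, n)` loop of A: the index walk over allocated/buckets
-- becomes a paired structural recursion over the two lists, carrying the same state
-- (remaining, buckets_satisfied); returns (allocated, remaining, early-return flag)
def fsPass (q n : Int) : List Int → List Int → Int → Int → List Int × Int × Bool
  | [], _, rem, _ => ([], rem, false)
  | _ :: _, [], rem, _ => ([], rem, false)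
  | b :: bs, a :: as_, rem, sat =>
    if a < b then
      let inc := min q (b - a)
      if rem - inc ≤ 0 ∨ sat = n then ((a + inc) :: as_, rem - inc, true)
      else
        let t := fsPass q n bs as_ (rem - inc) sat
        ((a + inc) :: t.1, t.2)
    else
      if rem ≤ 0 ∨ sat + 1 = n then (a :: as_, rem, true)
      else
        let t := fsPass q n bs as_ rem (sat + 1)
        (a :: t.1, t.2)

-- `1 if remaining < buckets_length else remaining // buckets_length`
def fsQuota (rem n : Int) : Int := if rem < n then 1 else PySem.Int.floordiv rem n

def fsLoop (buckets : List Int) (rem : Int) (alloc : List Int) : List Int :=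
  if 0 < rem ∧ buckets ≠ [] ∧ alloc.length = buckets.length then
    let n : Int := (buckets.length : Int)
    let t := fsPass (fsQuota rem n) n buckets alloc rem 0
    if t.2.2 = true then t.1
    else if h2 : t.2.1.toNat < rem.toNat then fsLoop buckets t.2.1 t.1
    else t.1
  else alloc
termination_by rem.toNat
decreasing_by exact h2

def fair_split (cap : Int) (buckets : List Int) : List Int :=
  fsLoop buckets cap (List.replicate buckets.length 0)

-- ===== PORT B =====
-- `b if b > 0 else 0`
def bClamp (b : Int) : Int := if 0 < b then b else 0

-- the water-level search loop of B: walks the sorted clamped capacities;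
-- m (count of not-yet-processed entries) is the length of the remaining suffix
def findGo : List Int → Int → Int → Int × Int
  | [], t, rem => (t, rem)
  | p :: rest, t, rem =>
    if p ≤ t then findGo rest t rem
    else
      let m : Int := ((p :: rest).length : Int)
      let step := p - t
      if m * step ≤ rem then findGo rest p (rem - m * step)
      else (t + PySem.Int.floordiv rem m, rem - PySem.Int.floordiv rem m * m)

-- output loop of B: level t, with one extra unit to the first rem buckets above the level
def buildOut : List Int → Int → Int → List Int
  | [], _, _ => []
  | b :: bs, t, rem =>
    let bp := bClamp b
    if t < bp then
      if 0 < rem then (t + 1) :: buildOut bs t (rem - 1)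
      else t :: buildOut bs t rem
    else bp :: buildOut bs t rem

def fair_split_alt (cap : Int) (buckets : List Int) : List Int :=
  if cap ≤ 0 then List.replicate buckets.length 0
  else
    let pos := PySem.List.sorted (buckets.map bClamp) (fun x => x) false
    if pos.sum ≤ cap then buckets.map bClamp
    else
      let tr := findGo pos 0 cap
      buildOut buckets tr.1 tr.2

-- ===== PRECONDITION & SPEC =====
-- Pre_ excludes exactly (cap > 0, buckets = []), where A raises ZeroDivisionError.
def Pre_fair_split (cap : Int) (buckets : List Int) : Prop := buckets ≠ [] ∨ cap ≤ 0
instance (cap : Int) (buckets : List Int) : Decidable (Pre_fair_split cap buckets) := by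
  unfold Pre_fair_split; infer_instance
def pvWitness_fair_split : Int × List Int := (5, [3, 4])

def Spec_fair_split (cap : Int) (buckets : List Int) (out : List Int) : Prop := out = fair_split_alt cap buckets
instance (cap : Int) (buckets : List Int) (out : List Int) : Decidable (Spec_fair_split cap buckets out) := by unfold Spec_fair_split; infer_instance

-- ===== CLAIM (what is proved, stated in full; the proofs are below) =====
def Claim_equal_fair_split : Prop := ∀ (cap : Int) (buckets : List Int), Dom_fair_split cap buckets → Pre_fair_split cap buckets → Spec_fair_split cap buckets (fair_split cap buckets)

-- ===== LEMMAS AND PROOFS =====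

-- definitional unfolding of fsPass on a double cons (keeps the branch conditions verbatim)
theorem fsPass_cons (q n b a rem sat : Int) (bs as_ : List Int) :
    fsPass q n (b :: bs) (a :: as_) rem sat =
      if a < b then
        (if rem - min q (b - a) ≤ 0 ∨ sat = n then ((a + min q (b - a)) :: as_, rem - min q (b - a), true)
         else ((a + min q (b - a)) :: (fsPass q n bs as_ (rem - min q (b - a)) sat).1,
               (fsPass q n bs as_ (rem - min q (b - a)) sat).2))
      else
        (if rem ≤ 0 ∨ sat + 1 = n then (a :: as_, rem, true)
         else (a :: (fsPass q n bs as_ rem (sat + 1)).1, (fsPass q n bs as_ rem (sat + 1)).2)) := rfl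


-- `min(bucket capacity clamped at 0, level t)`: the allocation of one bucket at water level t
def lvf (t b : Int) : Int := min (bClamp b) t
-- total allocation at level t
def lv (bs : List Int) (t : Int) : Int := (bs.map (lvf t)).sum
-- number of buckets still above level t
def cnt (bs : List Int) (t : Int) : Int := ((bs.filter (fun b => decide (t < bClamp b))).length : Int)
-- total (clamped) capacity
def Sv (bs : List Int) : Int := (bs.map bClamp).sum

-- (t, r) is a valid final state for starting level L and budget rem
def GoodAt (bs : List Int) (L rem t r : Int) : Prop :=
  0 ≤ r ∧ lv bs t + r = lv bs L + min rem (Sv bs - lv bs L) ∧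
    (r < cnt bs t ∨ (r = 0 ∧ cnt bs t = 0))

theorem fsQuota_pos (rem n : Int) (_hr : 0 < rem) (hn : 0 < n) : 1 ≤ fsQuota rem n := by
  unfold fsQuota
  split
  · exact le_refl 1
  · rw [PySem.Int.floordiv_eq_ediv_of_pos hn]
    rw [Int.le_ediv_iff_mul_le hn]
    omega

-- ---- basic facts about bClamp / lvf / lv / cnt ----

theorem bClamp_nonneg (b : Int) : 0 ≤ bClamp b := by unfold bClamp; split <;> omega

theorem lv_nil (t : Int) : lv [] t = 0 := rfl
theorem lv_cons (b : Int) (bs : List Int) (t : Int) : lv (b :: bs) t = lvf t b + lv bs t := rfl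
theorem Sv_nil : Sv [] = 0 := rfl
theorem Sv_cons (b : Int) (bs : List Int) : Sv (b :: bs) = bClamp b + Sv bs := rfl

theorem cnt_nil (t : Int) : cnt [] t = 0 := rfl
theorem cnt_cons (b : Int) (bs : List Int) (t : Int) :
    cnt (b :: bs) t = (if t < bClamp b then 1 else 0) + cnt bs t := by
  unfold cnt
  by_cases h : t < bClamp b <;> simp [h] <;> push_cast <;> omega

theorem cnt_nonneg (bs : List Int) (t : Int) : 0 ≤ cnt bs t := by
  unfold cnt; positivity

theorem cnt_le_length (bs : List Int) (t : Int) : cnt bs t ≤ (bs.length : Int) := by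
  unfold cnt
  exact_mod_cast List.length_filter_le _ _

theorem lvf_mono (b t t' : Int) (h : t ≤ t') : lvf t b ≤ lvf t' b := by
  unfold lvf; omega

theorem lvf_le_bClamp (b t : Int) : lvf t b ≤ bClamp b := by unfold lvf; omega

theorem lv_mono (bs : List Int) (t t' : Int) (h : t ≤ t') : lv bs t ≤ lv bs t' := by
  induction bs with
  | nil => simp [lv_nil]
  | cons b bs ih => rw [lv_cons, lv_cons]; have := lvf_mono b t t' h; omega

theorem lv_le_Sv (bs : List Int) (t : Int) : lv bs t ≤ Sv bs := by
  induction bs with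
  | nil => simp [lv_nil, Sv_nil]
  | cons b bs ih => rw [lv_cons, Sv_cons]; have := lvf_le_bClamp b t; omega

theorem lv_succ (bs : List Int) (t : Int) : lv bs (t + 1) = lv bs t + cnt bs t := by
  induction bs with
  | nil => simp [lv_nil, cnt_nil]
  | cons b bs ih =>
      rw [lv_cons, lv_cons, cnt_cons]
      have : lvf (t + 1) b = lvf t b + (if t < bClamp b then 1 else 0) := by
        unfold lvf; have := bClamp_nonneg b; split <;> omega
      omega

theorem lv_add_cnt_le (bs : List Int) (t t' : Int) (h : t < t') :
    lv bs t + cnt bs t ≤ lv bs t' := by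
  have h1 := lv_succ bs t
  have h2 := lv_mono bs (t + 1) t' (by omega)
  omega

theorem cnt_zero_iff (bs : List Int) (t : Int) :
    cnt bs t = 0 ↔ ∀ b ∈ bs, bClamp b ≤ t := by
  unfold cnt
  rw [show ((((bs.filter (fun b => decide (t < bClamp b))).length : Nat) : Int) = 0 ↔
      (bs.filter (fun b => decide (t < bClamp b))) = []) from by
    simp [List.length_eq_zero_iff]]
  rw [List.filter_eq_nil_iff]
  constructor
  · intro h b hb; have := h b hb; simp at this; omega
  · intro h b hb; have := h b hb; simp; omega

theorem lv_eq_Sv_of_all_le (bs : List Int) (t : Int) (h : ∀ b ∈ bs, bClamp b ≤ t) :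
    lv bs t = Sv bs := by
  induction bs with
  | nil => simp [lv_nil, Sv_nil]
  | cons b bs ih =>
      rw [lv_cons, Sv_cons, ih (fun x hx => h x (List.mem_cons_of_mem _ hx))]
      have hb := h b (List.mem_cons_self ..)
      have : lvf t b = bClamp b := by unfold lvf; omega
      omega

theorem map_lvf_eq_of_lv_eq (bs : List Int) (t t' : Int) (hle : t ≤ t')
    (heq : lv bs t = lv bs t') : bs.map (lvf t') = bs.map (lvf t) := by
  induction bs with
  | nil => rfl
  | cons b bs ih =>
      rw [lv_cons, lv_cons] at heq
      have h1 := lvf_mono b t t' hle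
      have h2 := lv_mono bs t t' hle
      simp only [List.map_cons]
      rw [ih (by omega)]
      congr 1
      omega

theorem map_lvf_zero (bs : List Int) : bs.map (lvf 0) = List.replicate bs.length 0 := by
  induction bs with
  | nil => rfl
  | cons b bs ih =>
      simp only [List.map_cons, List.length_cons, List.replicate_succ, ih]
      have := bClamp_nonneg b
      congr 1
      unfold lvf; omega

theorem lv_zero (bs : List Int) : lv bs 0 = 0 := by
  unfold lv
  rw [map_lvf_zero]
  simp

-- ---- buildOut facts ----

theorem buildOut_zero (bs : List Int) (t : Int) : buildOut bs t 0 = bs.map (lvf t) := by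
  induction bs with
  | nil => rfl
  | cons b bs ih =>
      simp only [buildOut, List.map_cons, ih]
      by_cases h : t < bClamp b
      · rw [if_pos h, if_neg (by omega)]
        congr 1
        unfold lvf; omega
      · rw [if_neg h]
        congr 1
        unfold lvf; omega

theorem buildOut_clamp (bs : List Int) (t r : Int) (h : ∀ b ∈ bs, bClamp b ≤ t) :
    buildOut bs t r = bs.map bClamp := by
  induction bs generalizing r with
  | nil => rfl
  | cons b bs ih =>
      simp only [buildOut, List.map_cons]
      rw [if_neg (by have := h b (List.mem_cons_self ..); omega)]
      rw [ih r (fun x hx => h x (List.mem_cons_of_mem _ hx))]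

-- ---- uniqueness: any two Good pairs give the same output ----

theorem good_le_unique (bs : List Int) (L rem t r t' r' : Int) (hle : t ≤ t')
    (hg : GoodAt bs L rem t r) (hg' : GoodAt bs L rem t' r') :
    buildOut bs t r = buildOut bs t' r' := by
  obtain ⟨hr, hE, hC⟩ := hg
  obtain ⟨hr', hE', hC'⟩ := hg'
  rcases eq_or_lt_of_le hle with heq | hlt
  · subst heq
    have : r = r' := by omega
    subst this; rfl
  · have hstep := lv_add_cnt_le bs t t' hlt
    rcases hC with hC | ⟨hr0, hc0⟩
    · omega
    · have hall : ∀ b ∈ bs, bClamp b ≤ t := (cnt_zero_iff bs t).mp hc0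
      have hSv : lv bs t = Sv bs := lv_eq_Sv_of_all_le bs t hall
      have hSv' : lv bs t' = Sv bs :=
        le_antisymm (lv_le_Sv bs t') (hSv ▸ lv_mono bs t t' hle)
      have hr'0 : r' = 0 := by omega
      rw [hr0, hr'0, buildOut_clamp bs t 0 hall,
        buildOut_clamp bs t' 0 (fun b hb => le_trans (hall b hb) hle)]

theorem good_unique (bs : List Int) (L rem t r t' r' : Int)
    (hg : GoodAt bs L rem t r) (hg' : GoodAt bs L rem t' r') :
    buildOut bs t r = buildOut bs t' r' := by
  rcases le_total t t' with h | h
  · exact good_le_unique bs L rem t r t' r' h hg hg'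
  · exact (good_le_unique bs L rem t' r' t r h hg' hg).symm

-- ---- the water-level search of B ----

theorem findGo_cons (p t rem : Int) (rest : List Int) :
    findGo (p :: rest) t rem =
      if p ≤ t then findGo rest t rem
      else if (((p :: rest).length : Nat) : Int) * (p - t) ≤ rem then
        findGo rest p (rem - (((p :: rest).length : Nat) : Int) * (p - t))
      else (t + PySem.Int.floordiv rem (((p :: rest).length : Nat) : Int),
            rem - PySem.Int.floordiv rem (((p :: rest).length : Nat) : Int) * (((p :: rest).length : Nat) : Int)) := rfl

-- sum of a pointwise-shifted map
theorem sum_shift (l : List Int) (f g : Int → Int) (c : Int)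
    (h : ∀ x ∈ l, f x = g x + c) :
    (l.map f).sum = (l.map g).sum + (l.length : Int) * c := by
  induction l with
  | nil => simp
  | cons x l ih =>
      simp only [List.map_cons, List.sum_cons, List.length_cons]
      rw [ih (fun y hy => h y (List.mem_cons_of_mem _ hy)), h x (List.mem_cons_self ..)]
      push_cast
      ring

theorem findGo_spec : ∀ (xs : List Int) (t rem : Int), List.Pairwise (· ≤ ·) xs → 0 ≤ rem →
    rem < (xs.map (fun x => x - min x t)).sum →
    t ≤ (findGo xs t rem).1 ∧ 0 ≤ (findGo xs t rem).2 ∧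
    (xs.map (fun x => min x (findGo xs t rem).1 - min x t)).sum + (findGo xs t rem).2 = rem ∧
    (findGo xs t rem).2 < (((xs.filter (fun x => decide ((findGo xs t rem).1 < x))).length : Nat) : Int) := by
  intro xs
  induction xs with
  | nil => intro t rem _ hrem hdem; simp at hdem; omega
  | cons p rest ih =>
      intro t rem hpw hrem hdem
      obtain ⟨hp, hpw'⟩ := List.pairwise_cons.mp hpw
      rw [findGo_cons]
      by_cases hpt : p ≤ t
      · rw [if_pos hpt]
        have hdem' : rem < (rest.map (fun x => x - min x t)).sum := by
          simp only [List.map_cons, List.sum_cons] at hdem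
          have : p - min p t = 0 := by omega
          omega
        obtain ⟨h1, h2, h3, h4⟩ := ih t rem hpw' hrem hdem'
        refine ⟨h1, h2, ?_, ?_⟩
        · simp only [List.map_cons, List.sum_cons]
          have : min p (findGo rest t rem).1 - min p t = 0 := by omega
          omega
        · have hfil : (p :: rest).filter (fun x => decide ((findGo rest t rem).1 < x)) =
              rest.filter (fun x => decide ((findGo rest t rem).1 < x)) := by
            rw [List.filter_cons_of_neg]
            simp; omega
          rw [hfil]; exact h4
      · rw [if_neg hpt]
        push_neg at hpt
        set m : Int := (((p :: rest).length : Nat) : Int) with hm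
        have hm1 : m = (rest.length : Int) + 1 := by rw [hm, List.length_cons]; push_cast; ring
        have hstep : 1 ≤ p - t := by omega
        have hmul : m * (p - t) = (rest.length : Int) * (p - t) + (p - t) := by rw [hm1]; ring
        by_cases hfull : m * (p - t) ≤ rem
        · rw [if_pos hfull]
          have hdecomp : ((p :: rest).map (fun x => x - min x t)).sum =
              m * (p - t) + (rest.map (fun x => x - min x p)).sum := by
            simp only [List.map_cons, List.sum_cons]
            rw [sum_shift rest (fun x => x - min x t) (fun x => x - min x p) (p - t)
              (fun x hx => by have := hp x hx; dsimp only; omega)]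
            have : p - min p t = p - t := by omega
            omega
          have hdem' : rem - m * (p - t) < (rest.map (fun x => x - min x p)).sum := by omega
          obtain ⟨h1, h2, h3, h4⟩ := ih p (rem - m * (p - t)) hpw' (by omega) hdem'
          set t' := (findGo rest p (rem - m * (p - t))).1 with ht'
          refine ⟨by omega, h2, ?_, ?_⟩
          · simp only [List.map_cons, List.sum_cons]
            rw [sum_shift rest (fun x => min x t' - min x t) (fun x => min x t' - min x p) (p - t)
              (fun x hx => by have := hp x hx; dsimp only; omega)]
            have : min p t' - min p t = p - t := by omega
            omega
          · have hfil : (p :: rest).filter (fun x => decide (t' < x)) =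
                rest.filter (fun x => decide (t' < x)) := by
              rw [List.filter_cons_of_neg]
              simp; omega
            rw [hfil]; exact h4
        · rw [if_neg hfull]
          push_neg at hfull
          have hm0 : 0 < m := by omega
          set k := PySem.Int.floordiv rem m with hk
          have hdm := PySem.Int.floordiv_mul_add_mod rem m
          rw [← hk] at hdm
          have hmod0 := PySem.Int.mod_nonneg rem hm0
          have hmodlt := PySem.Int.mod_lt rem hm0
          have hk0 : 0 ≤ k := by
            rw [hk, PySem.Int.floordiv_eq_ediv_of_pos hm0]
            exact Int.ediv_nonneg hrem (by omega)
          have hkstep : k < p - t := by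
            have h1 : k * m ≤ rem := by omega
            have h2 : rem < (p - t) * m := by rw [mul_comm]; omega
            have := lt_of_mul_lt_mul_right (lt_of_le_of_lt h1 h2) (le_of_lt hm0)
            omega
          refine ⟨by omega, by omega, ?_, ?_⟩
          · dsimp only
            simp only [List.map_cons, List.sum_cons]
            rw [sum_shift rest (fun x => min x (t + k) - min x t) (fun _ => 0) k
              (fun x hx => by have := hp x hx; dsimp only; omega)]
            have hmul2 : k * m = (rest.length : Int) * k + k := by rw [hm1]; ring
            have h5 : min p (t + k) - min p t = k := by omega
            have h6 : (rest.map (fun _ => (0:Int))).sum = 0 := by simp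
            rw [h6]
            omega
          · dsimp only
            have hfil : (p :: rest).filter (fun x => decide (t + k < x)) = p :: rest := by
              apply List.filter_eq_self.mpr
              intro x hx
              rcases List.mem_cons.mp hx with h | h
              · subst h; simp; omega
              · have := hp x h; simp; omega
            rw [hfil, ← hm]
            omega

-- ---- one pass of A over buckets whose allocation sits at water level L ----

theorem lvf_lt_iff (L b : Int) (hL : 0 ≤ L) : lvf L b < b ↔ L < bClamp b := by
  unfold lvf bClamp; split <;> omega

theorem lvf_of_sat (L b : Int) (h : bClamp b ≤ L) : lvf L b = bClamp b := by
  unfold lvf; omega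

theorem bClamp_pos_eq (b : Int) (h : 0 < bClamp b) : bClamp b = b := by
  unfold bClamp at *; split at h <;> omega

theorem lvf_unsat (L q b : Int) (hL : 0 ≤ L) (h : L < bClamp b) :
    lvf L b = L ∧ L + min q (b - L) = lvf (L + q) b := by
  have hbb := bClamp_pos_eq b (by omega)
  unfold lvf; omega

-- all buckets satisfied: the pass only counts, and returns early at the last bucket
theorem passA : ∀ (bs : List Int) (L q n rem sat : Int), 0 ≤ L → 0 < rem →
    (∀ b ∈ bs, bClamp b ≤ L) → sat + (bs.length : Int) = n → bs ≠ [] →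
    fsPass q n bs (bs.map (lvf L)) rem sat = (bs.map (lvf L), rem, true) := by
  intro bs
  induction bs with
  | nil => intro L q n rem sat _ _ _ _ hne; exact absurd rfl hne
  | cons b bs ih =>
      intro L q n rem sat hL hrem hall hlen _
      simp only [List.length_cons] at hlen
      push_cast at hlen
      rw [List.map_cons, fsPass_cons]
      have hsat : bClamp b ≤ L := hall b (List.mem_cons_self ..)
      rw [if_neg (by rw [lvf_lt_iff L b hL]; omega)]
      by_cases hbs : bs = []
      · subst hbs
        rw [if_pos (Or.inr (by simpa using hlen))]
      · have hlen1 : 0 < bs.length := List.length_pos_iff.mpr hbs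
        rw [if_neg (by push_neg; constructor <;> omega)]
        rw [ih L q n rem (sat + 1) hL hrem (fun x hx => hall x (List.mem_cons_of_mem _ hx))
          (by omega) hbs]

-- this pass's demand is below remaining: the whole pass runs, level rises from L to L+q
theorem passB : ∀ (bs : List Int) (L q n rem sat : Int), 0 ≤ L → 1 ≤ q → 0 < rem →
    lv bs (L + q) - lv bs L < rem → sat + ((bs.length : Int) - cnt bs L) < n →
    fsPass q n bs (bs.map (lvf L)) rem sat =
      (bs.map (lvf (L + q)), rem - (lv bs (L + q) - lv bs L), false) := by
  intro bs
  induction bs with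
  | nil => intro L q n rem sat _ _ _ _ _; simp [fsPass, lv_nil]
  | cons b bs ih =>
      intro L q n rem sat hL hq hrem hdem hinv
      simp only [List.length_cons] at hinv
      push_cast at hinv
      have hcnt_le := cnt_le_length bs L
      have hcnt0 := cnt_nonneg bs L
      have hdem_tail0 : 0 ≤ lv bs (L + q) - lv bs L := by
        have := lv_mono bs L (L + q) (by omega); omega
      rw [lv_cons, lv_cons] at hdem
      rw [cnt_cons] at hinv
      rw [List.map_cons, fsPass_cons]
      by_cases hu : L < bClamp b
      · rw [if_pos (by rw [lvf_lt_iff L b hL]; omega)]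
        obtain ⟨ha, hinc⟩ := lvf_unsat L q b hL hu
        rw [if_pos hu] at hinv
        have hd1 : 1 ≤ lvf (L + q) b - lvf L b := by
          have hbb := bClamp_pos_eq b (by omega)
          unfold lvf; omega
        rw [ha]
        rw [if_neg (by push_neg; constructor <;> omega)]
        rw [ih L q n (rem - min q (b - L)) sat hL hq (by omega) (by omega) (by omega)]
        simp only [List.map_cons, lv_cons, Prod.mk.injEq, List.cons.injEq]
        and_intros <;> first | trivial | omega
      · rw [if_neg (by rw [lvf_lt_iff L b hL]; omega)]
        rw [if_neg hu] at hinv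
        have hdh : lvf (L + q) b = lvf L b := by
          rw [lvf_of_sat L b (by omega), lvf_of_sat (L + q) b (by omega)]
        rw [if_neg (by push_neg; constructor <;> omega)]
        rw [ih L q n rem (sat + 1) hL hq hrem (by omega) (by omega)]
        simp only [List.map_cons, lv_cons, Prod.mk.injEq, List.cons.injEq]
        and_intros <;> first | trivial | omega

-- demand equals remaining exactly: the pass consumes everything and returns early
theorem passC : ∀ (bs : List Int) (L q n rem sat : Int), 0 ≤ L → 1 ≤ q → 0 < rem →
    lv bs (L + q) - lv bs L = rem → sat + ((bs.length : Int) - cnt bs L) < n →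
    fsPass q n bs (bs.map (lvf L)) rem sat = (bs.map (lvf (L + q)), 0, true) := by
  intro bs
  induction bs with
  | nil => intro L q n rem sat _ _ hrem hdem _; rw [lv_nil, lv_nil] at hdem; omega
  | cons b bs ih =>
      intro L q n rem sat hL hq hrem hdem hinv
      simp only [List.length_cons] at hinv
      push_cast at hinv
      have hcnt_le := cnt_le_length bs L
      have hcnt0 := cnt_nonneg bs L
      have hdem_tail0 : 0 ≤ lv bs (L + q) - lv bs L := by
        have := lv_mono bs L (L + q) (by omega); omega
      rw [lv_cons, lv_cons] at hdem
      rw [cnt_cons] at hinv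
      rw [List.map_cons, fsPass_cons]
      by_cases hu : L < bClamp b
      · rw [if_pos (by rw [lvf_lt_iff L b hL]; omega)]
        obtain ⟨ha, hinc⟩ := lvf_unsat L q b hL hu
        rw [if_pos hu] at hinv
        have hd1 : 1 ≤ lvf (L + q) b - lvf L b := by
          have hbb := bClamp_pos_eq b (by omega)
          unfold lvf; omega
        rw [ha]
        by_cases hz : rem - min q (b - L) ≤ 0
        · rw [if_pos (Or.inl hz)]
          have hzero : lv bs (L + q) = lv bs L := by omega
          simp only [List.map_cons, Prod.mk.injEq, List.cons.injEq]
          and_intros <;> first | trivial | omega | exact (map_lvf_eq_of_lv_eq bs L (L + q) (by omega) hzero.symm).symm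
        · rw [if_neg (by push_neg; constructor <;> omega)]
          rw [ih L q n (rem - min q (b - L)) sat hL hq (by omega) (by omega) (by omega)]
          simp only [List.map_cons, Prod.mk.injEq, List.cons.injEq]
          and_intros <;> first | trivial | omega
      · rw [if_neg (by rw [lvf_lt_iff L b hL]; omega)]
        rw [if_neg hu] at hinv
        have hdh : lvf (L + q) b = lvf L b := by
          rw [lvf_of_sat L b (by omega), lvf_of_sat (L + q) b (by omega)]
        rw [if_neg (by push_neg; constructor <;> omega)]
        rw [ih L q n rem (sat + 1) hL hq hrem (by omega) (by omega)]
        simp only [List.map_cons, Prod.mk.injEq, List.cons.injEq]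
        and_intros <;> first | trivial | omega

-- unit quota, more open buckets than remaining: the first rem open buckets get one unit each
theorem passD : ∀ (bs : List Int) (L n rem sat : Int), 0 ≤ L → 0 < rem →
    rem < cnt bs L → sat + ((bs.length : Int) - cnt bs L) < n →
    fsPass 1 n bs (bs.map (lvf L)) rem sat = (buildOut bs L rem, 0, true) := by
  intro bs
  induction bs with
  | nil => intro L n rem sat _ hrem hcnt _; rw [cnt_nil] at hcnt; omega
  | cons b bs ih =>
      intro L n rem sat hL hrem hcnt hinv
      simp only [List.length_cons] at hinv
      push_cast at hinv
      have hcnt_le := cnt_le_length bs L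
      have hcnt0 := cnt_nonneg bs L
      rw [cnt_cons] at hcnt hinv
      rw [List.map_cons, fsPass_cons]
      by_cases hu : L < bClamp b
      · rw [if_pos (by rw [lvf_lt_iff L b hL]; omega)]
        obtain ⟨ha, hinc⟩ := lvf_unsat L 1 b hL hu
        rw [if_pos hu] at hcnt hinv
        have hbb := bClamp_pos_eq b (by omega)
        have hmin : min 1 (b - lvf L b) = 1 := by rw [ha]; omega
        rw [hmin, ha]
        simp only [buildOut]
        rw [if_pos hu, if_pos hrem]
        by_cases hz : rem - 1 ≤ 0
        · rw [if_pos (Or.inl hz)]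
          have hr1 : rem = 1 := by omega
          rw [hr1]
          simp only [show (1:Int) - 1 = 0 from rfl, buildOut_zero]
        · rw [if_neg (by push_neg; constructor <;> omega)]
          rw [ih L n (rem - 1) sat hL (by omega) (by omega) (by omega)]
      · rw [if_neg (by rw [lvf_lt_iff L b hL]; omega)]
        rw [if_neg hu] at hcnt hinv
        simp only [buildOut]
        rw [if_neg hu]
        rw [if_neg (by push_neg; constructor <;> omega)]
        rw [lvf_of_sat L b (by omega)]
        rw [ih L n rem (sat + 1) hL hrem (by omega) (by omega)]

-- ---- the while-loop of A reaches exactly the Good final state ----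

theorem lv_diff_le (bs : List Int) (L q : Int) (hq : 0 ≤ q) :
    lv bs (L + q) - lv bs L ≤ (bs.length : Int) * q := by
  induction bs with
  | nil => simp [lv_nil]
  | cons b bs ih =>
      rw [lv_cons, lv_cons]
      have hhead : lvf (L + q) b - lvf L b ≤ q := by unfold lvf; omega
      have hcast : (((b :: bs).length : Nat) : Int) * q = (bs.length : Int) * q + q := by
        rw [List.length_cons]; push_cast; ring
      omega

theorem map_eq_buildOut_good_zero (bs : List Int) (L t r : Int) (hg : GoodAt bs L 0 t r) :
    bs.map (lvf L) = buildOut bs t r := by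
  have hgood : GoodAt bs L 0 L 0 := by
    refine ⟨le_refl 0, ?_, ?_⟩
    · have h1 := lv_le_Sv bs L; omega
    · have := cnt_nonneg bs L; omega
  calc bs.map (lvf L) = buildOut bs L 0 := (buildOut_zero _ _).symm
    _ = buildOut bs t r := good_unique bs L 0 L 0 t r hgood hg

theorem loop_good : ∀ (k : Nat) (rem L t r : Int) (bs : List Int), rem.toNat ≤ k →
    0 ≤ L → 0 ≤ rem → GoodAt bs L rem t r →
    fsLoop bs rem (bs.map (lvf L)) = buildOut bs t r := by
  intro k
  induction k with
  | zero =>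
      intro rem L t r bs hk hL hrem hg
      have h0 : rem = 0 := by omega
      subst h0
      rw [fsLoop, if_neg (by simp)]
      exact map_eq_buildOut_good_zero bs L t r hg
  | succ k ih =>
      intro rem L t r bs hk hL hrem hg
      by_cases hpos : 0 < rem
      · by_cases hbs : bs = []
        · subst hbs
          rw [fsLoop, if_neg (by simp)]
          obtain ⟨hr, hE, hC⟩ := hg
          rw [lv_nil] at hE
          have hSv : Sv ([] : List Int) = 0 := rfl
          have hcnt : cnt ([] : List Int) t = 0 := rfl
          rcases hC with hC | ⟨hr0, _⟩
          · rw [hcnt] at hC; omega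
          · subst hr0; rw [buildOut_zero]; rfl
        · have hcond : 0 < rem ∧ bs ≠ [] ∧ (bs.map (lvf L)).length = bs.length :=
            ⟨hpos, hbs, by simp⟩
          rw [fsLoop, if_pos hcond]
          dsimp only
          have hn : 0 < (bs.length : Int) := by
            have := List.length_pos_iff.mpr hbs; omega
          set n := (bs.length : Int) with hndef
          set q := fsQuota rem n with hqdef
          have hq : 1 ≤ q := fsQuota_pos rem n hpos hn
          by_cases hcnt : cnt bs L = 0
          · have hall := (cnt_zero_iff bs L).mp hcnt
            rw [passA bs L q n rem 0 hL hpos hall (by omega) hbs]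
            rw [if_pos rfl]
            have hgood : GoodAt bs L rem L 0 := by
              refine ⟨le_refl 0, ?_, by omega⟩
              have hS := lv_eq_Sv_of_all_le bs L hall
              omega
            calc bs.map (lvf L) = buildOut bs L 0 := (buildOut_zero _ _).symm
              _ = buildOut bs t r := good_unique bs L rem L 0 t r hgood hg
          · have hcpos : 0 < cnt bs L := lt_of_le_of_ne (cnt_nonneg _ _) (Ne.symm hcnt)
            have hdc : cnt bs L ≤ lv bs (L + q) - lv bs L := by
              have := lv_add_cnt_le bs L (L + q) (by omega); omega
            have hdS : lv bs (L + q) - lv bs L ≤ Sv bs - lv bs L := by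
              have := lv_le_Sv bs (L + q); omega
            rcases lt_trichotomy (lv bs (L + q) - lv bs L) rem with hlt | heq | hgt
            · rw [passB bs L q n rem 0 hL hq hpos hlt (by omega)]
              rw [if_neg (by simp)]
              dsimp only
              rw [dif_pos (by omega)]
              apply ih (rem - (lv bs (L + q) - lv bs L)) (L + q) t r bs (by omega) (by omega)
                (by omega)
              obtain ⟨hr, hE, hC⟩ := hg
              exact ⟨hr, by omega, hC⟩
            · rw [passC bs L q n rem 0 hL hq hpos heq (by omega)]
              rw [if_pos rfl]
              have hgood : GoodAt bs L rem (L + q) 0 := by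
                refine ⟨le_refl 0, by omega, ?_⟩
                have := cnt_nonneg bs (L + q); omega
              calc bs.map (lvf (L + q)) = buildOut bs (L + q) 0 := (buildOut_zero _ _).symm
                _ = buildOut bs t r := good_unique bs L rem (L + q) 0 t r hgood hg
            · have hq1 : q = 1 := by
                by_cases hrn : rem < n
                · rw [hqdef]; unfold fsQuota; rw [if_pos hrn]
                · exfalso
                  have hdle := lv_diff_le bs L q (by omega)
                  have hqv : q = PySem.Int.floordiv rem n := by
                    rw [hqdef]; unfold fsQuota; rw [if_neg hrn]
                  have hdm := PySem.Int.floordiv_mul_add_mod rem n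
                  rw [← hqv] at hdm
                  have hm0 := PySem.Int.mod_nonneg rem hn
                  have hcomm : (bs.length : Int) * q = q * n := by rw [hndef]; ring
                  omega
              rw [hq1] at hdc hdS hgt
              have hcl : rem < cnt bs L := by
                have hsucc := lv_succ bs L
                omega
              rw [hq1]
              rw [passD bs L n rem 0 hL hpos hcl (by omega)]
              rw [if_pos rfl]
              have hgood : GoodAt bs L rem L rem := ⟨by omega, by omega, Or.inl hcl⟩
              exact good_unique bs L rem L rem t r hgood hg
      · have h0 : rem = 0 := by omega
        subst h0
        rw [fsLoop, if_neg (by simp)]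
        exact map_eq_buildOut_good_zero bs L t r hg

-- ---- B's result is a Good state; main theorem ----

theorem fair_split_spec : Claim_equal_fair_split := by
  intro cap bs _ hpre
  unfold Spec_fair_split fair_split fair_split_alt
  by_cases hc : cap ≤ 0
  · rw [if_pos hc, fsLoop, if_neg (fun h => absurd h.1 (by omega))]
  · rw [if_neg hc]
    have hbs : bs ≠ [] := by
      rcases hpre with h | h
      · exact h
      · omega
    have hcap : 0 < cap := by omega
    rw [← map_lvf_zero]
    have hperm : (PySem.List.sorted (bs.map bClamp) (fun x => x) false).Perm (bs.map bClamp) :=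
      PySem.List.sorted_perm ..
    have hsum : (PySem.List.sorted (bs.map bClamp) (fun x => x) false).sum = Sv bs :=
      hperm.sum_eq
    by_cases hS : (PySem.List.sorted (bs.map bClamp) (fun x => x) false).sum ≤ cap
    · rw [if_pos hS]
      have hall : ∀ b ∈ bs, bClamp b ≤ Sv bs := by
        intro b hb
        exact List.single_le_sum
          (fun x hx => by
            obtain ⟨b', _, rfl⟩ := List.mem_map.mp hx
            exact bClamp_nonneg b')
          _ (List.mem_map_of_mem hb)
      have hgood : GoodAt bs 0 cap (Sv bs) 0 := by
        refine ⟨le_refl 0, ?_, Or.inr ⟨rfl, (cnt_zero_iff bs (Sv bs)).mpr hall⟩⟩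
        rw [lv_zero, lv_eq_Sv_of_all_le bs (Sv bs) hall]
        omega
      rw [loop_good cap.toNat cap 0 (Sv bs) 0 bs (le_refl _) (le_refl 0) (by omega) hgood]
      exact buildOut_clamp bs (Sv bs) 0 hall
    · rw [if_neg hS]
      push_neg at hS
      have hpw : List.Pairwise (· ≤ ·) (PySem.List.sorted (bs.map bClamp) (fun x => x) false) := by
        have := PySem.List.sorted_pairwise (xs := bs.map bClamp) (key := fun x => x)
        simpa using this
      have hnonneg : ∀ x ∈ PySem.List.sorted (bs.map bClamp) (fun x => x) false, 0 ≤ x := by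
        intro x hx
        have hx' : x ∈ bs.map bClamp := hperm.mem_iff.mp hx
        obtain ⟨b', _, rfl⟩ := List.mem_map.mp hx'
        exact bClamp_nonneg b'
      have hdem : cap <
          ((PySem.List.sorted (bs.map bClamp) (fun x => x) false).map (fun x => x - min x 0)).sum := by
        have he : ((PySem.List.sorted (bs.map bClamp) (fun x => x) false).map
            (fun x => x - min x 0)).sum =
            (PySem.List.sorted (bs.map bClamp) (fun x => x) false).sum := by
          rw [List.map_congr_left (g := fun x => x)
            (fun x hx => by have := hnonneg x hx; dsimp only; omega)]
          simp
        omega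
      obtain ⟨h1, h2, h3, h4⟩ :=
        findGo_spec (PySem.List.sorted (bs.map bClamp) (fun x => x) false) 0 cap hpw (by omega) hdem
      set pos := PySem.List.sorted (bs.map bClamp) (fun x => x) false with hposdef
      set t := (findGo pos 0 cap).1 with htdef
      set r := (findGo pos 0 cap).2 with hrdef
      have hlvt : (pos.map (fun x => min x t - min x 0)).sum = lv bs t := by
        have hp2 : (pos.map (fun x => min x t - min x 0)).sum =
            ((bs.map bClamp).map (fun x => min x t - min x 0)).sum :=
          (hperm.map _).sum_eq
        rw [hp2, List.map_map]
        unfold lv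
        congr 1
        apply List.map_congr_left
        intro b _
        have := bClamp_nonneg b
        unfold lvf
        dsimp only [Function.comp]
        omega
      have hcnteq : (((pos.filter (fun x => decide (t < x))).length : Nat) : Int) = cnt bs t := by
        have hp2 : (pos.filter (fun x => decide (t < x))).length =
            ((bs.map bClamp).filter (fun x => decide (t < x))).length :=
          (hperm.filter _).length_eq
        unfold cnt
        rw [hp2, ← List.countP_eq_length_filter, ← List.countP_eq_length_filter, List.countP_map]
        rfl
      have hgood : GoodAt bs 0 cap t r := by
        refine ⟨h2, ?_, Or.inl (by omega)⟩
        rw [lv_zero]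
        omega
      rw [loop_good cap.toNat cap 0 t r bs (le_refl _) (le_refl 0) (by omega) hgood]
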